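-- pv_equiv track=rewrite | github.com/lucley64/PyScada | pyscada/utils/__init__.py | min_pass
-- ===== SOURCE A (Python) =====
-- def min_pass(my_marks, my_pass, compare='gte'):
--     min_value = None
--     for x in my_marks:
--         if x >= my_pass and compare == 'gte':
--             min_value = x
--             break
--         elif x > my_pass and compare == 'gt':
--             min_value = x
--             break
--     if min_value is not None:
--         for x in my_marks:
--             if min_value > x >= my_pass and compare == 'gte':
--                 min_value = x
--             elif min_value > x > my_pass and compare == 'gt':
--                 min_value = x
--     return min_value
-- ===== SOURCE B (Python) =====
-- def min_pass(my_marks, my_pass, compare='gte'):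
--     if compare == 'gte':
--         candidates = [x for x in my_marks if x >= my_pass]
--     elif compare == 'gt':
--         candidates = [x for x in my_marks if x > my_pass]
--     else:
--         return None
--     return min(candidates, default=None)
-- ===== Notes on version B (the rewrite author's own statement) =====
-- stated objective: simpler
-- what changed: Replaces A's break-probe loop plus a second conditional min-scan with one predicate dispatch on compare, a single list-comprehension filter, and the built-in min with default=None.
import Mathlib
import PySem

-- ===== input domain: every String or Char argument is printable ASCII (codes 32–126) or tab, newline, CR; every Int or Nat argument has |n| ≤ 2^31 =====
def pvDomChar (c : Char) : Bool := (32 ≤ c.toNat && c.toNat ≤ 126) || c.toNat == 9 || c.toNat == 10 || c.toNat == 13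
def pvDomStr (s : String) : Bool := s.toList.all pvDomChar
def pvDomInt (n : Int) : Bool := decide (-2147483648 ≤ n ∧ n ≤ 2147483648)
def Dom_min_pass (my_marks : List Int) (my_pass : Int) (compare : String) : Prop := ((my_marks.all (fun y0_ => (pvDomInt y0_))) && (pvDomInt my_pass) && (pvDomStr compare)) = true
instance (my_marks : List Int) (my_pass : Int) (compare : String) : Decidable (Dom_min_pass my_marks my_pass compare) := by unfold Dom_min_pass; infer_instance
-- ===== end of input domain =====

-- B replaces A's break-probe loop plus second min-scan by one filter and a built-in min (objective: simpler).

-- ===== PORT A =====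
-- A's first loop: scan until a qualifying mark is found (break), else min_value stays None
def minPassFirst (my_pass : Int) (compare : String) : List Int → Option Int
  | [] => none
  | x :: xs =>
    if x ≥ my_pass ∧ compare = "gte" then some x
    else if x > my_pass ∧ compare = "gt" then some x
    else minPassFirst my_pass compare xs

def min_pass (my_marks : List Int) (my_pass : Int) (compare : String) : Option Int :=
  match minPassFirst my_pass compare my_marks with
  | none => none
  | some m0 =>
    -- A's second loop over my_marks, lowering min_value
    some (my_marks.foldl (fun m x =>
      if m > x ∧ x ≥ my_pass ∧ compare = "gte" then x
      else if m > x ∧ x > my_pass ∧ compare = "gt" then x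
      else m) m0)

-- ===== PORT B =====
def min_pass_alt (my_marks : List Int) (my_pass : Int) (compare : String) : Option Int :=
  if compare = "gte" then
    PySem.List.min? (my_marks.filter (fun x => decide (my_pass ≤ x))) (fun x => x)
  else if compare = "gt" then
    PySem.List.min? (my_marks.filter (fun x => decide (my_pass < x))) (fun x => x)
  else none

-- ===== PRECONDITION & SPEC =====
def Spec_min_pass (my_marks : List Int) (my_pass : Int) (compare : String) (out : Option Int) : Prop := out = min_pass_alt my_marks my_pass compare
instance (my_marks : List Int) (my_pass : Int) (compare : String) (out : Option Int) : Decidable (Spec_min_pass my_marks my_pass compare out) := by unfold Spec_min_pass; infer_instance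

-- ===== CLAIM (what is proved, stated in full; the proofs are below) =====
def Claim_equal_min_pass : Prop := ∀ (my_marks : List Int) (my_pass : Int) (compare : String), Dom_min_pass my_marks my_pass compare → Spec_min_pass my_marks my_pass compare (min_pass my_marks my_pass compare)

-- ===== LEMMAS AND PROOFS =====

-- A's first loop returns the head of the filtered list (for a matching compare value)
theorem minPassFirst_eq_head (p : Int) (c : String) (q : Int → Bool)
    (hq : ∀ x, ((x ≥ p ∧ c = "gte") ∨ (x > p ∧ c = "gt")) ↔ q x = true) :
    ∀ ms : List Int, minPassFirst p c ms = (ms.filter q).head? := by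
  intro ms
  induction ms with
  | nil => rfl
  | cons x xs ih =>
    by_cases h : q x = true
    · have h' := (hq x).mpr h
      simp only [minPassFirst, List.filter_cons, h, if_pos rfl]
      rcases h' with ⟨h1, h2⟩ | ⟨h1, h2⟩
      · rw [if_pos ⟨h1, h2⟩]; rfl
      · subst h2
        rw [if_neg (by simp), if_pos ⟨h1, rfl⟩]; rfl
    · have h1 : ¬ (x ≥ p ∧ c = "gte") := fun hc => h ((hq x).mp (Or.inl hc))
      have h2 : ¬ (x > p ∧ c = "gt") := fun hc => h ((hq x).mp (Or.inr hc))
      simp only [minPassFirst, if_neg h1, if_neg h2, List.filter_cons,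
        Bool.not_eq_true (q x) ▸ h]
      rw [if_neg (by simpa using h)]
      exact ih

-- a fold that conditionally lowers the accumulator = fold of min over the filtered list
theorem foldl_min_filter (q : Int → Bool) :
    ∀ (ms : List Int) (m0 : Int),
      ms.foldl (fun m x => if q x then min m x else m) m0
        = (ms.filter q).foldl min m0 := by
  intro ms
  induction ms with
  | nil => intro m0; rfl
  | cons x xs ih =>
    intro m0
    by_cases h : q x = true
    · simp [List.filter_cons, h, ih]
    · simp [List.filter_cons, h, ih]

-- A's second-loop body, for a fixed matching compare value, is the conditional-min step
theorem step_eq (p : Int) (c : String) (q : Int → Bool)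
    (hq : ∀ x, ((x ≥ p ∧ c = "gte") ∨ (x > p ∧ c = "gt")) ↔ q x = true) :
    (fun (m x : Int) =>
      if m > x ∧ x ≥ p ∧ c = "gte" then x
      else if m > x ∧ x > p ∧ c = "gt" then x
      else m)
    = (fun (m x : Int) => if q x then min m x else m) := by
  funext m x
  by_cases h : q x = true
  · rw [if_pos h]
    have h' := (hq x).mpr h
    by_cases hm : m > x
    · rcases h' with ⟨h1, h2⟩ | ⟨h1, h2⟩
      · rw [if_pos ⟨hm, h1, h2⟩]; omega
      · subst h2
        rw [if_neg (by simp), if_pos ⟨hm, h1, rfl⟩]; omega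
    · rw [if_neg (fun hc => hm hc.1), if_neg (fun hc => hm hc.1)]; omega
  · have h1 : ¬ (x ≥ p ∧ c = "gte") := fun hc => h ((hq x).mp (Or.inl hc))
    have h2 : ¬ (x > p ∧ c = "gt") := fun hc => h ((hq x).mp (Or.inr hc))
    rw [if_neg (fun hc => h1 hc.2), if_neg (fun hc => h2 hc.2), if_neg h]

-- the common core: for a matching compare value, A computes min? of the filtered list
theorem min_pass_core (ms : List Int) (p : Int) (c : String) (q : Int → Bool)
    (hq : ∀ x, ((x ≥ p ∧ c = "gte") ∨ (x > p ∧ c = "gt")) ↔ q x = true) :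
    min_pass ms p c = PySem.List.min? (ms.filter q) (fun x => x) := by
  unfold min_pass
  rw [minPassFirst_eq_head p c q hq ms]
  cases hf : ms.filter q with
  | nil => simp [PySem.List.min?]
  | cons a t =>
    simp only [List.head?]
    rw [step_eq p c q hq, foldl_min_filter q ms a, hf,
      PySem.List.min?_id_cons]
    simp

theorem min_pass_eq_alt (ms : List Int) (p : Int) (c : String) :
    min_pass ms p c = min_pass_alt ms p c := by
  unfold min_pass_alt
  by_cases hgte : c = "gte"
  · subst hgte
    rw [if_pos rfl]
    exact min_pass_core ms p "gte" (fun x => decide (p ≤ x)) (by intro x; simp)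
  · by_cases hgt : c = "gt"
    · subst hgt
      rw [if_neg (by simp), if_pos rfl]
      exact min_pass_core ms p "gt" (fun x => decide (p < x)) (by intro x; simp)
    · rw [if_neg hgte, if_neg hgt]
      unfold min_pass
      have : minPassFirst p c ms = none := by
        induction ms with
        | nil => rfl
        | cons x xs ih =>
          rw [minPassFirst, if_neg (fun h : x ≥ p ∧ c = "gte" => hgte h.2),
            if_neg (fun h : x > p ∧ c = "gt" => hgt h.2)]
          exact ih
      rw [this]

-- ===== VERDICT (by name: the statement is the Claim_ definition above) =====
theorem min_pass_spec : Claim_equal_min_pass := by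
  intro ms p c _
  show Spec_min_pass ms p c (min_pass ms p c)
  unfold Spec_min_pass
  exact min_pass_eq_alt ms p c
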